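-- pv_equiv track=rewrite | github.com/madushajg/SpamHamIdentifier | app.py | find_new_bigrams
-- ===== SOURCE A (Python) =====
-- def find_new_bigrams(tklist):
--     bg = list(())
--     pr = None
--     for tk in tklist:
--         if pr is not None:
--             bg.append((pr, tk))
--         pr = tk
--     return bg
-- ===== SOURCE B (Python) =====
-- def find_new_bigrams(tklist):
--     return list(zip(tklist, tklist[1:]))
-- ===== Notes on version B (the rewrite author's own statement) =====
-- stated objective: idiomatic
-- what changed: Replaces the streaming loop that threads a previous-token accumulator with a direct pairing of the list against its one-position shift (zip with tklist[1:]).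
import Mathlib
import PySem

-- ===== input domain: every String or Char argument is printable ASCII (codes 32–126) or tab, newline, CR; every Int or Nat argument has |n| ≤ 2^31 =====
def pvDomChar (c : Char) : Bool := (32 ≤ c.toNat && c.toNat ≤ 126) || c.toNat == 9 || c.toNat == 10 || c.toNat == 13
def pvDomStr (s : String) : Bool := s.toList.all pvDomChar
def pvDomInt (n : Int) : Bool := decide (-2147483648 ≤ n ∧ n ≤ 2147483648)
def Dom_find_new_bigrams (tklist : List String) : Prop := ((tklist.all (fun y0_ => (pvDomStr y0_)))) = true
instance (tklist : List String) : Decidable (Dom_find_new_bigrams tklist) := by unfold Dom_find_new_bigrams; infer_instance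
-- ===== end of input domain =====

-- B replaces the previous-token accumulator loop with zip of the list against its shift (idiomatic).

-- ===== PORT A =====
-- loop body: if pr is not None: bg.append((pr, tk)); pr = tk
def findNewBigramsStep (s : List (String × String) × Option String) (tk : String) :
    List (String × String) × Option String :=
  (match s.2 with
   | some p => s.1 ++ [(p, tk)]
   | none => s.1, some tk)

def find_new_bigrams (tklist : List String) : List (String × String) :=
  (tklist.foldl findNewBigramsStep ([], none)).1

-- ===== PORT B =====
-- list(zip(tklist, tklist[1:]))
def find_new_bigrams_alt (tklist : List String) : List (String × String) :=
  tklist.zip (PySem.List.slice tklist (some 1) none)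

-- ===== PRECONDITION & SPEC =====
def Spec_find_new_bigrams (tklist : List String) (out : List (String × String)) : Prop := out = find_new_bigrams_alt tklist
instance (tklist : List String) (out : List (String × String)) : Decidable (Spec_find_new_bigrams tklist out) := by unfold Spec_find_new_bigrams; infer_instance

-- ===== CLAIM (what is proved, stated in full; the proofs are below) =====
def Claim_equal_find_new_bigrams : Prop := ∀ (tklist : List String), Dom_find_new_bigrams tklist → Spec_find_new_bigrams tklist (find_new_bigrams tklist)

-- ===== LEMMAS AND PROOFS =====
theorem findNewBigrams_foldl_some (l : List String) (p : String) (acc : List (String × String)) :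
    (l.foldl findNewBigramsStep (acc, some p)).1 = acc ++ (p :: l).zip l := by
  induction l generalizing p acc with
  | nil => simp
  | cons t ts ih =>
      simp only [List.foldl_cons, findNewBigramsStep]
      rw [ih]
      simp [List.zip]

theorem find_new_bigrams_eq (l : List String) :
    find_new_bigrams l = find_new_bigrams_alt l := by
  cases l with
  | nil => rfl
  | cons t ts =>
      unfold find_new_bigrams find_new_bigrams_alt
      simp only [List.foldl_cons, findNewBigramsStep]
      rw [findNewBigrams_foldl_some]
      rw [PySem.List.slice_from_one]
      simp

-- ===== VERDICT (by name: the statement is the Claim_ definition above) =====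
theorem find_new_bigrams_spec : Claim_equal_find_new_bigrams := by
  intro tklist _
  exact find_new_bigrams_eq tklist
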